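-- pv_equiv track=rewrite | github.com/sharuk2k3/FS-Elite-2021-22 | Day-25/Day_25_P_3.py | longestGoldIdols
-- ===== SOURCE A (Python) =====
-- def longestGoldIdols(grid):
--     if len(grid) == 0:
--         return 0
--
--     n = len(grid)
--     m = len(grid[0])
--     ans = 0
--
--     dp = [[[0]*4 for i in range(0, m)] for j in range(0, n)]
--
--     for i in range(n):
--         for j in range(m):
--             if grid[i][j] == 0:
--                 continue
--             for k in range(4):
--                 dp[i][j][k] = 1
--             if i - 1 >= 0:
--                 dp[i][j][0] += dp[i - 1][j][0]
--             if j - 1 >= 0: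
--                 dp[i][j][1] += dp[i][j - 1][1]
--             if i - 1 >= 0 and j - 1 >= 0:
--                 dp[i][j][2] += dp[i - 1][j - 1][2]
--             if i - 1 >= 0 and j + 1 < m:
--                 dp[i][j][3] += dp[i - 1][j + 1][3]
--             ans = max(ans, max(dp[i][j][0], dp[i][j][1]))
--             ans = max(ans, max(dp[i][j][2], dp[i][j][3]))
--
--     return ans
-- ===== SOURCE B (Python) =====
-- def longestGoldIdols(grid):
--     if not grid:
--         return 0
--     n, m = len(grid), len(grid[0])
--
--     def up(i, j):
--         c = 0
--         while i >= 0 and grid[i][j] != 0: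
--             c += 1
--             i -= 1
--         return c
--
--     def left(i, j):
--         c = 0
--         while j >= 0 and grid[i][j] != 0:
--             c += 1
--             j -= 1
--         return c
--
--     def diag(i, j):
--         c = 0
--         while i >= 0 and j >= 0 and grid[i][j] != 0:
--             c += 1
--             i -= 1
--             j -= 1
--         return c
--
--     def anti(i, j):
--         c = 0
--         while i >= 0 and j < m and grid[i][j] != 0:
--             c += 1
--             i -= 1
--             j += 1
--         return c
--
--     best = 0
--     for i in range(n):
--         for j in range(m):
--             best = max(best, up(i, j), left(i, j), diag(i, j), anti(i, j))
--     return best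
-- ===== Notes on version B (the rewrite author's own statement) =====
-- stated objective: simpler
-- what changed: Replaces A's n*m*4 dp table and its cross-cell recurrences by four direct backward walks per cell (up, left, diagonal, anti-diagonal) with a running counter, keeping only a global max and no auxiliary storage.
import Mathlib
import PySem

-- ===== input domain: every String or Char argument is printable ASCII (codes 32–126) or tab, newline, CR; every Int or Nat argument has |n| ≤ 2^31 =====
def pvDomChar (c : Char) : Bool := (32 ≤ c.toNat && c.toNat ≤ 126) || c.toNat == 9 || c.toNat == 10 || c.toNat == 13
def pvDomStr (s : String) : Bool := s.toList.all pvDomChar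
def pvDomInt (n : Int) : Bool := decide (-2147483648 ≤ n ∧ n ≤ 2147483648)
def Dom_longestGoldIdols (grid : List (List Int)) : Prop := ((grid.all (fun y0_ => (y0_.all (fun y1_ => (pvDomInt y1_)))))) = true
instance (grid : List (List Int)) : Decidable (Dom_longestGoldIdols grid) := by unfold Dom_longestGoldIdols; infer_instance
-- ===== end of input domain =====

-- B replaces A's n×m×4 dp table by four per-cell backward walks with a running
-- counter (no table, no extra memory); objective: simpler (not faster).

-- ===== PORT A =====
-- grid[i][j]; Pre_ guarantees the indices used by both ports are in range,
-- so the default 0 is never consulted on admitted inputs.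
def ggGI (grid : List (List Int)) (i j : Nat) : Int := (grid.getD i []).getD j 0

-- the dp array of A, kept as an update log read back first-match (same reads/writes)
inductive DpStore where
  | base : DpStore
  | node : Nat → Nat → Nat → Int → DpStore → DpStore

def dpRead : DpStore → Nat → Nat → Nat → Int
  | .base, _, _, _ => 0
  | .node i j k v rest, a, b, c => if a = i ∧ b = j ∧ c = k then v else dpRead rest a b c

-- dp[i][j][k] = v
def dpSet (d : DpStore) (i j k : Nat) (v : Int) : DpStore := .node i j k v d

-- the guarded statement `if <g>: dp[i][j][k] += dp[pi][pj][k]`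
def bump (d : DpStore) (i j k pi pj : Nat) (g : Prop) [Decidable g] : DpStore :=
  if g then dpSet d i j k (dpRead d i j k + dpRead d pi pj k) else d

-- body of A's inner loop, step for step
def stepA (grid : List (List Int)) (m : Nat) (s : DpStore × Int) (i j : Nat) : DpStore × Int :=
  if ggGI grid i j = 0 then s
  else
    let d0 := (List.range 4).foldl (fun d k => dpSet d i j k 1) s.1
    let d1 := bump d0 i j 0 (i-1) j (1 ≤ i)
    let d2 := bump d1 i j 1 i (j-1) (1 ≤ j)
    let d3 := bump d2 i j 2 (i-1) (j-1) (1 ≤ i ∧ 1 ≤ j)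
    let d4 := bump d3 i j 3 (i-1) (j+1) (1 ≤ i ∧ j+1 < m)
    let a1 := max s.2 (max (dpRead d4 i j 0) (dpRead d4 i j 1))
    let a2 := max a1 (max (dpRead d4 i j 2) (dpRead d4 i j 3))
    (d4, a2)

def longestGoldIdols (grid : List (List Int)) : Int :=
  if grid.length = 0 then 0
  else
    let n := grid.length
    let m := (grid.headD []).length
    ((List.range n).foldl
      (fun s i => (List.range m).foldl (fun s j => stepA grid m s i j) s)
      (DpStore.base, 0)).2

-- ===== PORT B =====
-- each `while` of Source B rendered as the equivalent structural recursion (exact)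
def upRun (grid : List (List Int)) (j : Nat) : Nat → Int
  | 0 => if ggGI grid 0 j ≠ 0 then 1 else 0
  | i+1 => if ggGI grid (i+1) j ≠ 0 then 1 + upRun grid j i else 0

def leftRun (grid : List (List Int)) (i : Nat) : Nat → Int
  | 0 => if ggGI grid i 0 ≠ 0 then 1 else 0
  | j+1 => if ggGI grid i (j+1) ≠ 0 then 1 + leftRun grid i j else 0

def diagRun (grid : List (List Int)) : Nat → Nat → Int
  | 0, j => if ggGI grid 0 j ≠ 0 then 1 else 0
  | i+1, 0 => if ggGI grid (i+1) 0 ≠ 0 then 1 else 0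
  | i+1, j+1 => if ggGI grid (i+1) (j+1) ≠ 0 then 1 + diagRun grid i j else 0

def antiRun (grid : List (List Int)) (m : Nat) : Nat → Nat → Int
  | 0, j => if ggGI grid 0 j ≠ 0 then 1 else 0
  | i+1, j => if ggGI grid (i+1) j ≠ 0 then
                (if j+1 < m then 1 + antiRun grid m i (j+1) else 1)
              else 0

-- best = max(best, up(i,j), left(i,j), diag(i,j), anti(i,j))
def stepB (grid : List (List Int)) (m : Nat) (best : Int) (i j : Nat) : Int :=
  max (max (max (max best (upRun grid j i)) (leftRun grid i j)) (diagRun grid i j))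
    (antiRun grid m i j)

def longestGoldIdols_alt (grid : List (List Int)) : Int :=
  if grid = [] then 0
  else
    let n := grid.length
    let m := (grid.headD []).length
    (List.range n).foldl
      (fun best i => (List.range m).foldl (fun best j => stepB grid m best i j) best) 0

-- ===== PRECONDITION & SPEC =====
-- Pre_ excludes exactly the ragged grids on which the Python A raises IndexError
-- (a row shorter than the first row); the Python B raises there as well.
def Pre_longestGoldIdols (grid : List (List Int)) : Prop :=
  grid = [] ∨ ∀ row ∈ grid, (grid.headD []).length ≤ row.length

instance (grid : List (List Int)) : Decidable (Pre_longestGoldIdols grid) := by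
  unfold Pre_longestGoldIdols; infer_instance

def pvWitness_longestGoldIdols : List (List Int) := [[1, 0, 2], [0, 3, 1], [1, 1, 0]]

def Spec_longestGoldIdols (grid : List (List Int)) (out : Int) : Prop := out = longestGoldIdols_alt grid
instance (grid : List (List Int)) (out : Int) : Decidable (Spec_longestGoldIdols grid out) := by unfold Spec_longestGoldIdols; infer_instance

-- ===== CLAIM (what is proved, stated in full; the proofs are below) =====
def Claim_equal_longestGoldIdols : Prop := ∀ (grid : List (List Int)), Dom_longestGoldIdols grid → Pre_longestGoldIdols grid → Spec_longestGoldIdols grid (longestGoldIdols grid)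

-- ===== LEMMAS AND PROOFS =====

-- the intended content of dp[a][b][k]: the four run lengths B computes
def Rk (grid : List (List Int)) (m a b : Nat) : Nat → Int
  | 0 => upRun grid b a
  | 1 => leftRun grid a b
  | 2 => diagRun grid a b
  | 3 => antiRun grid m a b
  | _+4 => 0

-- dp after processing all cells row-major-before (i, j)
def dpSpec (grid : List (List Int)) (m i j : Nat) : Nat → Nat → Nat → Int :=
  fun a b c => if (a < i ∨ (a = i ∧ b < j)) ∧ b < m then Rk grid m a b c else 0

lemma Rk_zero (grid : List (List Int)) (m i j : Nat) (h : ggGI grid i j = 0) (c : Nat) :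
    Rk grid m i j c = 0 := by
  match c with
  | 0 => cases i <;> simp [Rk, upRun, h]
  | 1 => cases j <;> simp [Rk, leftRun, h]
  | 2 => cases i <;> cases j <;> simp [Rk, diagRun, h]
  | 3 => cases i <;> simp [Rk, antiRun, h]
  | c+4 => rfl

lemma range4_fold (D : DpStore) (i j : Nat) :
    dpRead ((List.range 4).foldl (fun d k => dpSet d i j k 1) D)
      = fun a b c => if a = i ∧ b = j ∧ c < 4 then 1 else dpRead D a b c := by
  funext a b c
  simp only [show List.range 4 = [0,1,2,3] by decide, List.foldl, dpSet, dpRead]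
  split_ifs <;> omega

-- the value A writes into dp[i][j][·] at a nonzero cell, reading neighbours from D
def nv (D : Nat → Nat → Nat → Int) (m i j : Nat) : Nat → Int
  | 0 => if 1 ≤ i then 1 + D (i-1) j 0 else 1
  | 1 => if 1 ≤ j then 1 + D i (j-1) 1 else 1
  | 2 => if 1 ≤ i ∧ 1 ≤ j then 1 + D (i-1) (j-1) 2 else 1
  | 3 => if 1 ≤ i ∧ j+1 < m then 1 + D (i-1) (j+1) 3 else 1
  | _+4 => 0

-- reading back one guarded `+=` layer
lemma layer_read (D : DpStore) (Dfun : Nat → Nat → Nat → Int) (w : Nat → Int)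
    (i j k pi pj : Nat) (hk : k < 4)
    (g : Prop) [Decidable g] (hg4 : g → ¬(pi = i ∧ pj = j))
    (hD : dpRead D = fun a b c => if a = i ∧ b = j ∧ c < 4 then w c else Dfun a b c) :
    dpRead (bump D i j k pi pj g)
      = fun a b c => if a = i ∧ b = j ∧ c < 4 then
          (if c = k ∧ g then w k + Dfun pi pj k else w c) else Dfun a b c := by
  funext a b c
  by_cases hgg : g
  · have hpp := hg4 hgg
    simp only [bump, dpSet, if_pos hgg, dpRead, hD]
    split_ifs <;> first | rfl | omega | tauto
  · simp only [bump, if_neg hgg, hD]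
    split_ifs <;> first | rfl | omega | tauto

lemma stepA_fst (grid : List (List Int)) (m i j : Nat) (D : DpStore) (a : Int)
    (h : ¬ ggGI grid i j = 0) :
    dpRead (stepA grid m (D, a) i j).1
      = fun a' b' c' => if a' = i ∧ b' = j ∧ c' < 4 then nv (dpRead D) m i j c'
                        else dpRead D a' b' c' := by
  unfold stepA
  rw [if_neg h]
  dsimp only
  have e0 := range4_fold D i j
  have e1 := layer_read _ (dpRead D) (fun _ => (1 : Int)) i j 0 (i-1) j (by omega)
    (1 ≤ i) (by omega) e0
  have e2 := layer_read _ (dpRead D)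
    (fun c => if c = 0 ∧ 1 ≤ i then 1 + dpRead D (i-1) j 0 else 1) i j 1 i (j-1) (by omega)
    (1 ≤ j) (by omega) e1
  have e3 := layer_read _ (dpRead D)
    (fun c => if c = 1 ∧ 1 ≤ j then
        (if (1:Nat) = 0 ∧ 1 ≤ i then 1 + dpRead D (i-1) j 0 else 1) + dpRead D i (j-1) 1
      else if c = 0 ∧ 1 ≤ i then 1 + dpRead D (i-1) j 0 else 1)
    i j 2 (i-1) (j-1) (by omega) (1 ≤ i ∧ 1 ≤ j) (by omega) e2
  have e4 := layer_read _ (dpRead D)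
    (fun c => if c = 2 ∧ (1 ≤ i ∧ 1 ≤ j) then
        (if (2:Nat) = 1 ∧ 1 ≤ j then
            (if (1:Nat) = 0 ∧ 1 ≤ i then 1 + dpRead D (i-1) j 0 else 1) + dpRead D i (j-1) 1
          else if (2:Nat) = 0 ∧ 1 ≤ i then 1 + dpRead D (i-1) j 0 else 1) + dpRead D (i-1) (j-1) 2
      else if c = 1 ∧ 1 ≤ j then
        (if (1:Nat) = 0 ∧ 1 ≤ i then 1 + dpRead D (i-1) j 0 else 1) + dpRead D i (j-1) 1
      else if c = 0 ∧ 1 ≤ i then 1 + dpRead D (i-1) j 0 else 1)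
    i j 3 (i-1) (j+1) (by omega) (1 ≤ i ∧ j+1 < m) (by omega) e3
  rw [e4]
  funext a' b' c'
  by_cases hit : a' = i ∧ b' = j ∧ c' < 4
  · obtain ⟨rfl, rfl, hc4⟩ := hit
    rw [if_pos (show a' = a' ∧ b' = b' ∧ c' < 4 from ⟨rfl, rfl, hc4⟩)]
    match c', hc4 with
    | 0, _ => simp [nv]
    | 1, _ => simp [nv]
    | 2, _ => by_cases h12 : 1 ≤ a' ∧ 1 ≤ b' <;> simp [nv, h12]
    | 3, _ => by_cases h13 : 1 ≤ a' ∧ b' + 1 < m <;> simp [nv, h13]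
  · rw [if_neg hit, if_neg hit]

lemma stepA_reads (grid : List (List Int)) (m i j : Nat) (D : DpStore) (a : Int)
    (h : ¬ ggGI grid i j = 0) :
    (stepA grid m (D, a) i j).2
      = max (max a (max (dpRead (stepA grid m (D, a) i j).1 i j 0)
                        (dpRead (stepA grid m (D, a) i j).1 i j 1)))
          (max (dpRead (stepA grid m (D, a) i j).1 i j 2)
               (dpRead (stepA grid m (D, a) i j).1 i j 3)) := by
  unfold stepA
  rw [if_neg h]

lemma stepA_snd (grid : List (List Int)) (m i j : Nat) (D : DpStore) (a : Int)
    (h : ¬ ggGI grid i j = 0) :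
    (stepA grid m (D, a) i j).2
      = max (max a (max (nv (dpRead D) m i j 0) (nv (dpRead D) m i j 1)))
          (max (nv (dpRead D) m i j 2) (nv (dpRead D) m i j 3)) := by
  have hr : ∀ k, k < 4 → dpRead (stepA grid m (D, a) i j).1 i j k = nv (dpRead D) m i j k := by
    intro k hk
    rw [stepA_fst grid m i j D a h]
    simp [hk]
  rw [stepA_reads grid m i j D a h, hr 0 (by omega), hr 1 (by omega), hr 2 (by omega),
    hr 3 (by omega)]

-- at a nonzero cell the written values are exactly B's run lengths
lemma nv_Rk (grid : List (List Int)) (m i j : Nat) (h : ¬ ggGI grid i j = 0) (hj : j < m) :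
    ∀ c, c < 4 → nv (dpSpec grid m i j) m i j c = Rk grid m i j c := by
  intro c hc
  match c with
  | 0 =>
    cases i with
    | zero => simp [nv, Rk, upRun, h]
    | succ i' => simp [nv, Rk, dpSpec, upRun, h, hj]
  | 1 =>
    cases j with
    | zero => simp [nv, Rk, leftRun, h]
    | succ j' => simp [nv, Rk, dpSpec, leftRun, h, show j' < m by omega]
  | 2 =>
    match i, j with
    | 0, j => simp [nv, Rk, diagRun, h]
    | i'+1, 0 => simp [nv, Rk, diagRun, h]
    | i'+1, j'+1 => simp [nv, Rk, dpSpec, diagRun, h, show j' < m by omega]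
  | 3 =>
    cases i with
    | zero => simp [nv, Rk, antiRun, h]
    | succ i' =>
      by_cases hjm : j + 1 < m
      · simp [nv, Rk, dpSpec, antiRun, h, hjm]
      · simp [nv, Rk, antiRun, h, hjm]

lemma step_cell (grid : List (List Int)) (m i j : Nat) (hj : j < m) (D : DpStore)
    (hD : dpRead D = dpSpec grid m i j) (a : Int) (ha : 0 ≤ a) :
    dpRead (stepA grid m (D, a) i j).1 = dpSpec grid m i (j+1) ∧
      (stepA grid m (D, a) i j).2 = stepB grid m a i j := by
  by_cases h : ggGI grid i j = 0
  · have hstep : stepA grid m (D, a) i j = (D, a) := by unfold stepA; rw [if_pos h]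
    have hs : dpSpec grid m i j = dpSpec grid m i (j+1) := by
      funext a b c
      by_cases hij : a = i ∧ b = j
      · obtain ⟨rfl, rfl⟩ := hij
        simp only [dpSpec]
        simp [hj, Rk_zero grid m a b h]
      · have : ((a < i ∨ (a = i ∧ b < j)) ∧ b < m) ↔ ((a < i ∨ (a = i ∧ b < j+1)) ∧ b < m) := by
          omega
        simp only [dpSpec, this]
    have h0 : upRun grid j i = 0 := by cases i <;> simp [upRun, h]
    have h1 : leftRun grid i j = 0 := by cases j <;> simp [leftRun, h]
    have h2 : diagRun grid i j = 0 := by cases i <;> cases j <;> simp [diagRun, h]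
    have h3 : antiRun grid m i j = 0 := by cases i <;> simp [antiRun, h]
    refine ⟨by rw [hstep, hD, hs], ?_⟩
    rw [hstep]
    simp only [stepB, h0, h1, h2, h3]
    omega
  · constructor
    · rw [stepA_fst grid m i j D a h, hD]
      funext a' b' c'
      by_cases hit : a' = i ∧ b' = j ∧ c' < 4
      · obtain ⟨rfl, rfl, hc4⟩ := hit
        rw [if_pos ⟨rfl, rfl, hc4⟩, nv_Rk grid m a' b' h hj c' hc4]
        simp only [dpSpec]
        simp [hj]
      · rw [if_neg hit]
        by_cases hc4 : c' < 4
        · have hab : ¬(a' = i ∧ b' = j) := by tauto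
          have : ((a' < i ∨ (a' = i ∧ b' < j)) ∧ b' < m)
              ↔ ((a' < i ∨ (a' = i ∧ b' < j+1)) ∧ b' < m) := by omega
          simp only [dpSpec, this]
        · obtain ⟨c, rfl⟩ : ∃ c, c' = c + 4 := ⟨c' - 4, by omega⟩
          have hz : Rk grid m a' b' (c + 4) = 0 := rfl
          simp only [dpSpec, hz]
          simp
    · rw [stepA_snd grid m i j D a h, hD, nv_Rk grid m i j h hj 0 (by omega),
        nv_Rk grid m i j h hj 1 (by omega), nv_Rk grid m i j h hj 2 (by omega),
        nv_Rk grid m i j h hj 3 (by omega)]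
      simp only [stepB, Rk]
      omega

-- any fold by a step that never decreases its accumulator keeps it ≥ start
lemma foldl_ge {α : Type} (f : Int → α → Int) (hs : ∀ a x, a ≤ f a x) :
    ∀ (l : List α) (a : Int), a ≤ l.foldl f a := by
  intro l
  induction l with
  | nil => intro a; exact le_refl a
  | cons x xs ih => intro a; exact le_trans (hs a x) (ih (f a x))

lemma stepB_ge (grid : List (List Int)) (m : Nat) (a : Int) (i j : Nat) :
    a ≤ stepB grid m a i j :=
  le_trans (le_trans (le_trans (le_max_left _ _) (le_max_left _ _)) (le_max_left _ _))
    (le_max_left _ _)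

lemma inner_loop (grid : List (List Int)) (m i : Nat) :
    ∀ j, j ≤ m → ∀ (D : DpStore) (a : Int), dpRead D = dpSpec grid m i 0 → 0 ≤ a →
      dpRead ((List.range j).foldl (fun s jj => stepA grid m s i jj) (D, a)).1
          = dpSpec grid m i j ∧
        ((List.range j).foldl (fun s jj => stepA grid m s i jj) (D, a)).2
          = (List.range j).foldl (fun b jj => stepB grid m b i jj) a := by
  intro j
  induction j with
  | zero => intro _ D a hD _; exact ⟨hD, rfl⟩
  | succ j ih =>
    intro hj D a hD ha
    rw [List.range_succ, List.foldl_append, List.foldl_append]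
    simp only [List.foldl]
    obtain ⟨h1, h2⟩ := ih (by omega) D a hD ha
    have hnn : 0 ≤ ((List.range j).foldl (fun s jj => stepA grid m s i jj) (D, a)).2 := by
      rw [h2]
      exact le_trans ha (foldl_ge _ (fun b jj => stepB_ge grid m b i jj) _ a)
    obtain ⟨g1, g2⟩ := step_cell grid m i j (by omega)
      ((List.range j).foldl (fun s jj => stepA grid m s i jj) (D, a)).1 h1
      ((List.range j).foldl (fun s jj => stepA grid m s i jj) (D, a)).2 hnn
    exact ⟨g1, by rw [g2, h2]⟩

lemma row_shift (grid : List (List Int)) (m i : Nat) :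
    dpSpec grid m i m = dpSpec grid m (i+1) 0 := by
  funext a b c
  have : ((a < i ∨ (a = i ∧ b < m)) ∧ b < m) ↔ ((a < i+1 ∨ (a = i+1 ∧ b < 0)) ∧ b < m) := by
    omega
  simp only [dpSpec, this]

lemma outer_loop (grid : List (List Int)) (m : Nat) :
    ∀ i, dpRead ((List.range i).foldl
          (fun s ii => (List.range m).foldl (fun s jj => stepA grid m s ii jj) s)
          (DpStore.base, 0)).1 = dpSpec grid m i 0 ∧
      ((List.range i).foldl
          (fun s ii => (List.range m).foldl (fun s jj => stepA grid m s ii jj) s)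
          (DpStore.base, 0)).2
        = (List.range i).foldl
            (fun b ii => (List.range m).foldl (fun b jj => stepB grid m b ii jj) b) 0 := by
  intro i
  induction i with
  | zero =>
    refine ⟨?_, rfl⟩
    funext a b c
    simp only [dpSpec, List.range_zero, List.foldl, dpRead]
    rw [if_neg (by omega)]
  | succ i ih =>
    rw [List.range_succ, List.foldl_append, List.foldl_append]
    simp only [List.foldl]
    obtain ⟨h1, h2⟩ := ih
    have hnn : 0 ≤ ((List.range i).foldl
        (fun s ii => (List.range m).foldl (fun s jj => stepA grid m s ii jj) s)
        (DpStore.base, 0)).2 := by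
      rw [h2]
      exact foldl_ge _ (fun b ii => foldl_ge _ (fun b jj => stepB_ge grid m b ii jj) _ b) _ 0
    obtain ⟨g1, g2⟩ := inner_loop grid m i m (le_refl m)
      ((List.range i).foldl
        (fun s ii => (List.range m).foldl (fun s jj => stepA grid m s ii jj) s)
        (DpStore.base, 0)).1
      ((List.range i).foldl
        (fun s ii => (List.range m).foldl (fun s jj => stepA grid m s ii jj) s)
        (DpStore.base, 0)).2 h1 hnn
    refine ⟨by rw [g1, row_shift], by rw [g2, h2]⟩

-- ===== VERDICT (by name: the statement is the Claim_ definition above) =====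
theorem longestGoldIdols_spec : Claim_equal_longestGoldIdols := by
  intro grid _ _
  unfold Spec_longestGoldIdols longestGoldIdols longestGoldIdols_alt
  by_cases hg : grid = []
  · simp [hg]
  · rw [if_neg (by simpa using hg), if_neg hg]
    dsimp only
    exact (outer_loop grid (grid.headD []).length grid.length).2
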